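-- pv_equiv track=rewrite | github.com/hirosuzuki/procon | atcoder/abc129/abc129_e.py | solve
-- ===== SOURCE A (Python) =====
-- M = 10**9+7
--
-- def solve(L):
--     if L == 0:
--         return 1
--     result = 1
--     t = 0
--     for c in L:
--         if c == "1":
--             t += 1
--             result = (result * 3) % M
--         else:
--             result = (result * 3 - 2 ** t * 2) % M
--
--     return result
-- ===== SOURCE B (Python) =====
-- M = 10**9+7
--
-- def solve(L):
--     if L == 0:
--         return 1
--     n = len(L)
--     free = 0
--     ones = 0
--     for i, c in enumerate(L):
--         if c == "1":
--             free = (free + pow(2, ones, M) * pow(3, n - 1 - i, M)) % M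
--             ones += 1
--     return (free + pow(2, ones, M)) % M
-- ===== Notes on version B (the rewrite author's own statement) =====
-- stated objective: alternative
-- what changed: A maintains a single multiplicative DP accumulator updated per character with an unreduced exact power 2**t; B instead computes the answer as a closed-form sum, adding the contribution pow(2,ones,M)*pow(3,n-1-i,M) for each set bit at position i and finally the all-tight term pow(2,ones,M), all reduced mod M.
import Mathlib
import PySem

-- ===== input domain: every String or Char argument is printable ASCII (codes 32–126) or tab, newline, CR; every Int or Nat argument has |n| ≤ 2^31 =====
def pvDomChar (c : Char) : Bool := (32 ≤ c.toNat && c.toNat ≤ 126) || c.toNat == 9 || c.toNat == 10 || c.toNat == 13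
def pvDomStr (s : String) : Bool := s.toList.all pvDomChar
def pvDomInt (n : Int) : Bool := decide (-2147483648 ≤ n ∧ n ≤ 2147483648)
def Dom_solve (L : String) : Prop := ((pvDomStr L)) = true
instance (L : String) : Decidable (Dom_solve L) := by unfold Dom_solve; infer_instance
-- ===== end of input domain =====

-- B replaces A's multiplicative DP accumulator by a closed-form sum of per-'1'-bit
-- contributions 2^ones·3^(n-1-i) plus the all-tight term 2^ones (objective: alternative decomposition).
-- In both Pythons the `if L == 0` guard is dead for any str argument (str == int is False in Python),
-- so it is omitted from both ports.

def pvM : Int := 10 ^ 9 + 7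

-- ===== PORT A =====
def pvStepA (st : Int × Nat) (c : Char) : Int × Nat :=
  if c == '1' then (st.1 * 3 % pvM, st.2 + 1)
  else ((st.1 * 3 - 2 ^ st.2 * 2) % pvM, st.2)

def solve (L : String) : Int :=
  (L.toList.foldl pvStepA (1, 0)).1

-- ===== PORT B =====
def pvStepB (n : Nat) (st : Int × Nat) (p : Int × Char) : Int × Nat :=
  if p.2 == '1' then
    ((st.1 + (2 ^ st.2 % pvM) * (3 ^ ((n : Int) - 1 - p.1).toNat % pvM)) % pvM, st.2 + 1)
  else st

def solve_alt (L : String) : Int :=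
  let n := L.toList.length
  let s := (PySem.List.enumerate L.toList).foldl (pvStepB n) (0, 0)
  (s.1 + 2 ^ s.2 % pvM) % pvM

-- ===== PRECONDITION & SPEC =====
def Spec_solve (L : String) (out : Int) : Prop := out = solve_alt L
instance (L : String) (out : Int) : Decidable (Spec_solve L out) := by unfold Spec_solve; infer_instance

-- ===== CLAIM (what is proved, stated in full; the proofs are below) =====
def Claim_equal_solve : Prop := ∀ (L : String), Dom_solve L → Spec_solve L (solve L)

-- ===== LEMMAS AND PROOFS =====

lemma pvModEq_emod (a : Int) : Int.ModEq pvM (a % pvM) a := Int.emod_emod_of_dvd a dvd_rfl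

-- A's accumulator stays in [0, pvM) once at least one character has been processed.
lemma pvA_bounds : ∀ (cs : List Char) (st : Int × Nat), cs ≠ [] →
    0 ≤ (cs.foldl pvStepA st).1 ∧ (cs.foldl pvStepA st).1 < pvM := by
  intro cs
  induction cs with
  | nil => intro st h; exact absurd rfl h
  | cons c cs ih =>
    intro st _
    cases cs with
    | nil =>
      simp only [List.foldl, pvStepA]
      split <;> constructor <;>
        first
          | exact Int.emod_nonneg _ (by norm_num [pvM])
          | exact Int.emod_lt_of_pos _ (by norm_num [pvM])
    | cons d ds => exact ih (pvStepA st c) (by simp)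

-- Main invariant: running A's fold on the suffix `cs` from state (r, t) and B's fold on the
-- enumerated suffix from state (free, t) preserves the counter and the modular relation
-- r·3^|cs| ≡ free + 2^t·3^|cs|  ⇒  r' ≡ free' + 2^t'  (mod pvM).
lemma pvInv (n : Nat) : ∀ (cs : List Char) (k : Int) (r free : Int) (t : Nat),
    k + cs.length = n →
    Int.ModEq pvM (r * 3 ^ cs.length) (free + 2 ^ t * 3 ^ cs.length) →
    (cs.foldl pvStepA (r, t)).2 = ((PySem.List.enumerate cs k).foldl (pvStepB n) (free, t)).2 ∧
    Int.ModEq pvM (cs.foldl pvStepA (r, t)).1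
      (((PySem.List.enumerate cs k).foldl (pvStepB n) (free, t)).1
        + 2 ^ ((PySem.List.enumerate cs k).foldl (pvStepB n) (free, t)).2) := by
  intro cs
  induction cs with
  | nil =>
    intro k r free t _ h
    simpa [PySem.List.enumerate] using h
  | cons c cs ih =>
    intro k r free t hk h
    have hlen : ((n : Int) - 1 - k).toNat = cs.length := by
      simp [List.length_cons] at hk; omega
    rw [PySem.List.enumerate_cons]
    simp only [List.foldl_cons, pvStepA, pvStepB]
    by_cases hc : c = '1'
    · simp only [hc, beq_self_eq_true, if_true]
      apply ih (k + 1) _ _ (t + 1) (by simp [List.length_cons] at hk ⊢; omega)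
      rw [hlen]
      calc r * 3 % pvM * 3 ^ cs.length
          ≡ r * 3 * 3 ^ cs.length [ZMOD pvM] := (pvModEq_emod _).mul_right _
        _ = r * 3 ^ (cs.length + 1) := by ring
        _ ≡ free + 2 ^ t * 3 ^ (cs.length + 1) [ZMOD pvM] := by
              simpa [List.length_cons] using h
        _ = (free + 2 ^ t * 3 ^ cs.length) + 2 ^ (t + 1) * 3 ^ cs.length := by ring
        _ ≡ (free + (2 ^ t % pvM) * (3 ^ cs.length % pvM)) % pvM + 2 ^ (t + 1) * 3 ^ cs.length [ZMOD pvM] := by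
              have h1 : Int.ModEq pvM (free + 2 ^ t * 3 ^ cs.length)
                  ((free + (2 ^ t % pvM) * (3 ^ cs.length % pvM)) % pvM) := by
                refine ((Int.ModEq.refl free).add ((pvModEq_emod _).symm.mul
                  (pvModEq_emod _).symm)).trans ?_
                exact (pvModEq_emod _).symm
              exact h1.add_right _
    · have hc' : (c == '1') = false := by simp [hc]
      simp only [hc']
      apply ih (k + 1) _ _ t (by simp [List.length_cons] at hk ⊢; omega)
      calc (r * 3 - 2 ^ t * 2) % pvM * 3 ^ cs.length
          ≡ (r * 3 - 2 ^ t * 2) * 3 ^ cs.length [ZMOD pvM] := (pvModEq_emod _).mul_right _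
        _ = r * 3 ^ (cs.length + 1) - 2 ^ t * 2 * 3 ^ cs.length := by ring
        _ ≡ (free + 2 ^ t * 3 ^ (cs.length + 1)) - 2 ^ t * 2 * 3 ^ cs.length [ZMOD pvM] := by
              exact (by simpa [List.length_cons] using h : Int.ModEq pvM (r * 3 ^ (cs.length + 1)) _).sub_right _
        _ = free + 2 ^ t * 3 ^ cs.length := by ring

-- ===== VERDICT (by name: the statement is the Claim_ definition above) =====
theorem solve_spec : Claim_equal_solve := by
  intro L _
  show solve L = solve_alt L
  unfold solve solve_alt
  cases hcs : L.toList with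
  | nil => simp [PySem.List.enumerate, pvM]
  | cons c cs =>
    have hne : (c :: cs : List Char) ≠ [] := by simp
    obtain ⟨h0, h1⟩ := pvA_bounds (c :: cs) (1, 0) hne
    have hinv := pvInv (c :: cs).length (c :: cs) 0 1 0 0 (by simp)
      (by simp)
    set A := (c :: cs).foldl pvStepA (1, 0) with hA
    set B := (PySem.List.enumerate (c :: cs) 0).foldl (pvStepB (c :: cs).length) ((0 : Int), (0 : Nat)) with hB
    obtain ⟨-, hmod⟩ := hinv
    have hmod2 : Int.ModEq pvM A.1 ((B.1 + 2 ^ B.2 % pvM) % pvM) := by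
      refine hmod.trans ?_
      refine ((Int.ModEq.refl B.1).add (pvModEq_emod _).symm).trans ?_
      exact (pvModEq_emod _).symm
    have hr : ((B.1 + 2 ^ B.2 % pvM) % pvM) % pvM = (B.1 + 2 ^ B.2 % pvM) % pvM :=
      Int.emod_emod_of_dvd _ dvd_rfl
    have : A.1 % pvM = A.1 := Int.emod_eq_of_lt h0 h1
    simpa [Int.ModEq, hr, this] using hmod2
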